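-- pv_equiv track=rewrite | github.com/Anri-Lombard/sallm | src/main/sallm/data/factory.py | _reconstruct_entities_from_iob
-- ===== SOURCE A (Python) =====
-- def _reconstruct_entities_from_iob(
--     tokens: list[str], ner_tag_ids: list[int], tag_map: list[str]
-- ) -> list[str]:
--     entities = []
--     current_entity_tokens = []
--     current_entity_label = None
--
--     for token, tag_id in zip(tokens, ner_tag_ids, strict=False):
--         tag_name = tag_map[tag_id]
--
--         if tag_name.startswith("B-"):
--             if current_entity_tokens:
--                 entity_text = " ".join(current_entity_tokens)
--                 entities.append(f"{current_entity_label}: {entity_text}")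
--
--             current_entity_tokens = [token]
--             current_entity_label = tag_name[2:]
--         elif tag_name.startswith("I-"):
--             if current_entity_label == tag_name[2:]:
--                 current_entity_tokens.append(token)
--             else:
--                 if current_entity_tokens:
--                     entity_text = " ".join(current_entity_tokens)
--                     entities.append(f"{current_entity_label}: {entity_text}")
--                 current_entity_tokens = []
--                 current_entity_label = None
--         else:  # O tag
--             if current_entity_tokens:
--                 entity_text = " ".join(current_entity_tokens)
--                 entities.append(f"{current_entity_label}: {entity_text}")
--             current_entity_tokens = []
--             current_entity_label = None
--
--     if current_entity_tokens:
--         entity_text = " ".join(current_entity_tokens)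
--         entities.append(f"{current_entity_label}: {entity_text}")
--
--     return entities
-- ===== SOURCE B (Python) =====
-- def _reconstruct_entities_from_iob(tokens, ner_tag_ids, tag_map):
--     entities = []
--     n = min(len(tokens), len(ner_tag_ids))
--     i = 0
--     while i < n:
--         tag = tag_map[ner_tag_ids[i]]
--         if tag.startswith("B-"):
--             label = tag[2:]
--             parts = [tokens[i]]
--             i += 1
--             while i < n:
--                 t = tag_map[ner_tag_ids[i]]
--                 if t.startswith("I-") and t[2:] == label:
--                     parts.append(tokens[i])
--                     i += 1
--                 else:
--                     break
--             entities.append(f"{label}: {' '.join(parts)}")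
--         else:
--             i += 1
--     return entities
-- ===== Notes on version B (the rewrite author's own statement) =====
-- stated objective: alternative
-- what changed: Replaces A's single-pass state machine (current span tokens + label carried across every iteration, with flush logic duplicated in three branches) by a span-driven nested loop: only a B- tag opens an entity, an inner while consumes the matching I- run, and everything else is skipped, emitting each entity exactly once where its span ends.
import Mathlib
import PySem

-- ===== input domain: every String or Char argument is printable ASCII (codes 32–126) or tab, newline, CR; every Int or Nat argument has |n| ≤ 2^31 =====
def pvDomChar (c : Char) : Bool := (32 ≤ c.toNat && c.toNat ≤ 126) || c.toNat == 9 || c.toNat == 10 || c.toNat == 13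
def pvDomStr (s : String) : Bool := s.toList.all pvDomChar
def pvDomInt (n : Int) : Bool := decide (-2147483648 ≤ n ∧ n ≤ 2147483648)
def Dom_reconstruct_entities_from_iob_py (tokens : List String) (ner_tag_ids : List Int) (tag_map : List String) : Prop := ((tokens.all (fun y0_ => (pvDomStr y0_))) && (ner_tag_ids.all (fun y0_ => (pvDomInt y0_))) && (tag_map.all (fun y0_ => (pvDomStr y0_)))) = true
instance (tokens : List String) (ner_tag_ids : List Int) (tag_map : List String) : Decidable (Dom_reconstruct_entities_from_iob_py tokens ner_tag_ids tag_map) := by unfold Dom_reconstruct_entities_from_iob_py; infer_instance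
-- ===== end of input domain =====

-- B replaces A's carried-state machine by a span-driven nested loop (B- opens a span, an inner
-- loop consumes the matching I- run); same return value on all inputs where A does not raise.

-- tag_map[tag_id]; the default "" is only reached outside Pre_ (where Python raises IndexError)
def pvTagOf (tag_map : List String) (tid : Int) : String :=
  (PySem.List.pyGet? tag_map tid).getD ""

def pvFlush (lab : Option String) (cur : List String) : String :=
  lab.getD "None" ++ ": " ++ PySem.Str.join " " cur

-- ===== PORT A =====
def pvLoopA (tag_map : List String) : List (String × Int) → List String → List String → Option String → List String
  | [], ent, cur, lab => if cur.isEmpty then ent else ent ++ [pvFlush lab cur]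
  | (tok, tid) :: rest, ent, cur, lab =>
    let tag := pvTagOf tag_map tid
    if PySem.Str.startswith tag "B-" then
      let ent' := if cur.isEmpty then ent else ent ++ [pvFlush lab cur]
      pvLoopA tag_map rest ent' [tok] (some (PySem.Str.slice tag (some 2) none))
    else if PySem.Str.startswith tag "I-" then
      if (match lab with
          | some s => s == PySem.Str.slice tag (some 2) none
          | none => false) then
        pvLoopA tag_map rest ent (cur ++ [tok]) lab
      else
        let ent' := if cur.isEmpty then ent else ent ++ [pvFlush lab cur]
        pvLoopA tag_map rest ent' [] none
    else
      let ent' := if cur.isEmpty then ent else ent ++ [pvFlush lab cur]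
      pvLoopA tag_map rest ent' [] none

def reconstruct_entities_from_iob_py (tokens : List String) (ner_tag_ids : List Int) (tag_map : List String) : List String :=
  pvLoopA tag_map (tokens.zip ner_tag_ids) [] [] none

-- ===== PORT B =====
-- condition of Source B's inner while: next tag is an I- tag carrying the current label
def pvCont (tag_map : List String) (lab : String) (p : String × Int) : Bool :=
  PySem.Str.startswith (pvTagOf tag_map p.2) "I-" &&
    (PySem.Str.slice (pvTagOf tag_map p.2) (some 2) none == lab)

def pvLoopB (tag_map : List String) : List (String × Int) → List String
  | [] => []
  | (tok, tid) :: rest =>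
    let tag := pvTagOf tag_map tid
    if PySem.Str.startswith tag "B-" then
      let lab := PySem.Str.slice tag (some 2) none
      let spanRest := rest.takeWhile (pvCont tag_map lab)
      let rest' := rest.dropWhile (pvCont tag_map lab)
      (lab ++ ": " ++ PySem.Str.join " " (tok :: spanRest.map (·.1))) :: pvLoopB tag_map rest'
    else
      pvLoopB tag_map rest
termination_by l => l.length
decreasing_by
  · exact Nat.lt_succ_of_le (List.length_dropWhile_le _ _)
  · simp

def reconstruct_entities_from_iob_py_alt (tokens : List String) (ner_tag_ids : List Int) (tag_map : List String) : List String :=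
  pvLoopB tag_map (tokens.zip ner_tag_ids)

-- ===== PRECONDITION & SPEC =====
-- Pre_ excludes exactly the inputs where A raises IndexError: some consumed tag id out of range of tag_map
def Pre_reconstruct_entities_from_iob_py (tokens : List String) (ner_tag_ids : List Int) (tag_map : List String) : Prop :=
  ∀ p ∈ tokens.zip ner_tag_ids, PySem.Raise.InRange tag_map.length p.2
instance (tokens : List String) (ner_tag_ids : List Int) (tag_map : List String) : Decidable (Pre_reconstruct_entities_from_iob_py tokens ner_tag_ids tag_map) := by unfold Pre_reconstruct_entities_from_iob_py; infer_instance

def pvWitness_reconstruct_entities_from_iob_py : List String × List Int × List String :=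
  (["Alice", "met", "Bob", "Smith"], [1, 0, 1, 2], ["O", "B-PER", "I-PER"])

def Spec_reconstruct_entities_from_iob_py (tokens : List String) (ner_tag_ids : List Int) (tag_map : List String) (out : List String) : Prop := out = reconstruct_entities_from_iob_py_alt tokens ner_tag_ids tag_map
instance (tokens : List String) (ner_tag_ids : List Int) (tag_map : List String) (out : List String) : Decidable (Spec_reconstruct_entities_from_iob_py tokens ner_tag_ids tag_map out) := by unfold Spec_reconstruct_entities_from_iob_py; infer_instance

-- ===== CLAIM (what is proved, stated in full; the proofs are below) =====
def Claim_equal_reconstruct_entities_from_iob_py : Prop := ∀ (tokens : List String) (ner_tag_ids : List Int) (tag_map : List String), Dom_reconstruct_entities_from_iob_py tokens ner_tag_ids tag_map → Pre_reconstruct_entities_from_iob_py tokens ner_tag_ids tag_map → Spec_reconstruct_entities_from_iob_py tokens ner_tag_ids tag_map (reconstruct_entities_from_iob_py tokens ner_tag_ids tag_map)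

-- ===== LEMMAS AND PROOFS =====

-- The two loop invariants, proved together by induction on the pair list:
-- with no open span A's loop appends exactly B's output; with an open span (cur ≠ [], label lab)
-- A's loop emits the span extended by the matching I- run and then behaves like B on the rest.
theorem pvLoopA_eq_pvLoopB (tag_map : List String) (l : List (String × Int)) :
    (∀ ent, pvLoopA tag_map l ent [] none = ent ++ pvLoopB tag_map l) ∧
    (∀ ent cur lab, cur ≠ [] →
      pvLoopA tag_map l ent cur (some lab) =
        ent ++ (lab ++ ": " ++ PySem.Str.join " " (cur ++ (l.takeWhile (pvCont tag_map lab)).map (·.1)))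
          :: pvLoopB tag_map (l.dropWhile (pvCont tag_map lab))) := by
  induction l with
  | nil =>
    constructor
    · intro ent; simp [pvLoopA, pvLoopB]
    · intro ent cur lab hcur
      simp [pvLoopA, pvLoopB, pvFlush, List.isEmpty_iff, hcur]
  | cons p rest ih =>
    obtain ⟨tok, tid⟩ := p
    constructor
    · intro ent
      by_cases hB : PySem.Str.startswith (pvTagOf tag_map tid) "B-"
      · rw [pvLoopA, pvLoopB]
        simp only [hB, List.isEmpty_nil, if_pos]
        rw [(ih.2) ent [tok] _ (by simp)]
        simp
      · by_cases hI : PySem.Str.startswith (pvTagOf tag_map tid) "I-"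
        · rw [pvLoopA, pvLoopB]
          simp only [hB, hI, List.isEmpty_nil, if_pos]
          exact ih.1 ent
        · rw [pvLoopA, pvLoopB]
          simp only [hB, hI, List.isEmpty_nil, if_pos]
          exact ih.1 ent
    · intro ent cur lab hcur
      by_cases hc : pvCont tag_map lab (tok, tid)
      · have hI : PySem.Str.startswith (pvTagOf tag_map tid) "I-" = true := by
          have := hc; simp only [pvCont, Bool.and_eq_true] at this; simpa using this.1
        have hlab : PySem.Str.slice (pvTagOf tag_map tid) (some 2) none = lab := by
          have := hc; simp [pvCont, Bool.and_eq_true] at this; exact this.2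
        have hB : PySem.Str.startswith (pvTagOf tag_map tid) "B-" = false := by
          by_contra h
          have hB' : PySem.Str.startswith (pvTagOf tag_map tid) "B-" = true := by
            cases h' : PySem.Str.startswith (pvTagOf tag_map tid) "B-" <;> simp_all
          have h1 := (PySem.Chars.startswith_iff _ _).mp (by simpa using hB')
          have h2 := (PySem.Chars.startswith_iff _ _).mp (by simpa using hI)
          rcases h1 with ⟨t1, ht1⟩; rcases h2 with ⟨t2, ht2⟩
          rw [← ht2] at ht1
          simp at ht1
        rw [pvLoopA]
        simp only [hB, hI, hlab, beq_self_eq_true]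
        rw [(ih.2) ent (cur ++ [tok]) lab (by simp)]
        rw [List.takeWhile_cons_of_pos hc, List.dropWhile_cons_of_pos hc]
        simp
      · -- inner while stops here; A flushes (or re-opens) at this element
        rw [List.takeWhile_cons_of_neg hc, List.dropWhile_cons_of_neg hc]
        by_cases hB : PySem.Str.startswith (pvTagOf tag_map tid) "B-"
        · rw [pvLoopA, pvLoopB]
          simp only [hB, List.isEmpty_iff, hcur, pvFlush]
          rw [(ih.2) _ [tok] _ (by simp)]
          simp [Option.getD]
        · by_cases hI : PySem.Str.startswith (pvTagOf tag_map tid) "I-"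
          · have hne : (lab == PySem.Str.slice (pvTagOf tag_map tid) (some 2) none) = false := by
              cases h : (lab == PySem.Str.slice (pvTagOf tag_map tid) (some 2) none)
              · rfl
              · refine absurd ?_ hc
                simp only [pvCont, hI, Bool.true_and, beq_iff_eq]
                exact (eq_of_beq h).symm
            rw [pvLoopA, pvLoopB]
            simp only [hB, hI, hne, List.isEmpty_iff, hcur, pvFlush]
            rw [ih.1]
            simp
          · rw [pvLoopA, pvLoopB]
            simp only [hB, hI, List.isEmpty_iff, hcur, pvFlush]
            rw [ih.1]
            simp

-- ===== VERDICT (by name: the statement is the Claim_ definition above) =====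
theorem reconstruct_entities_from_iob_py_spec : Claim_equal_reconstruct_entities_from_iob_py := by
  intro tokens ner_tag_ids tag_map _ _
  unfold Spec_reconstruct_entities_from_iob_py reconstruct_entities_from_iob_py reconstruct_entities_from_iob_py_alt
  simpa using (pvLoopA_eq_pvLoopB tag_map (tokens.zip ner_tag_ids)).1 []
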